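-- pv_equiv track=rewrite | github.com/vaishu567/dsapracrepo | Python/dynamicProgramming/strings/distinctsub.py | distinctSub
-- ===== SOURCE A (Python) =====
-- def distinctSub(s,sub,i,j):
--     if j<0:
--         return 1
--     if i<0:
--         return 0
--     if s[i]==sub[j]:
--         return distinctSub(s,sub,i-1,j-1)+distinctSub(s,sub,i-1,j)
--     else:
--         return distinctSub(s,sub,i-1,j)
-- ===== SOURCE B (Python) =====
-- def distinctSub(s, sub, i, j):
--     if j < 0:
--         return 1
--     if i < 0:
--         return 0
--     # bottom-up DP over prefixes: dp[m] = number of distinct subsequences of the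
--     # processed prefix of s that equal sub[:m]
--     dp = [1] + [0] * (j + 1)
--     for c in s[: i + 1]:
--         dp = [1] + [dp[m + 1] + (dp[m] if sub[m] == c else 0) for m in range(j + 1)]
--     return dp[j + 1]
-- ===== Notes on version B (the rewrite author's own statement) =====
-- stated objective: alternative
-- what changed: Replaces the top-down branching recursion over (i,j) with a bottom-up dynamic-programming pass that builds a row of prefix-match counts while scanning s[:i+1] once.
import Mathlib
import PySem

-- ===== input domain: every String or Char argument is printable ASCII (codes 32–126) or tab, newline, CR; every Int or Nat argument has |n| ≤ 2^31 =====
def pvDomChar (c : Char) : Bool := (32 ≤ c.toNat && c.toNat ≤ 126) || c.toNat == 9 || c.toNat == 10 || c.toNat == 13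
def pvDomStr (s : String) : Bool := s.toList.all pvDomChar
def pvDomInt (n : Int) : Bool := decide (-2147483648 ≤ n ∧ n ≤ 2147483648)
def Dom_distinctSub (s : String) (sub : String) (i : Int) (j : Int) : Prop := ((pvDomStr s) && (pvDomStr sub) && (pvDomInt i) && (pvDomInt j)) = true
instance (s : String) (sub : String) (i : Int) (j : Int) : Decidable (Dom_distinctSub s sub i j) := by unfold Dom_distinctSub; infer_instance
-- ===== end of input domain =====

-- B replaces A's branching recursion over (i, j) with a bottom-up DP row over prefixes of sub
-- scanned once along s[:i+1] (objective: alternative).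


-- ===== PORT A =====
def distinctSub (s : String) (sub : String) (i : Int) (j : Int) : Int :=
  if _hj : j < 0 then 1
  else if _hi : i < 0 then 0
  else
    match PySem.Str.pyGet? s i, PySem.Str.pyGet? sub j with
    | some a, some b =>
        if a == b then distinctSub s sub (i-1) (j-1) + distinctSub s sub (i-1) j
        else distinctSub s sub (i-1) j
    | _, _ => 0   -- s[i] or sub[j] raises IndexError in Python; such inputs are outside Pre_
  termination_by (i + 1).toNat
  decreasing_by all_goals omega

-- ===== PORT B =====
def distinctSub_alt (s : String) (sub : String) (i : Int) (j : Int) : Int :=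
  if j < 0 then 1
  else if i < 0 then 0
  else
    -- dp = [1] + [0]*(j+1)
    let dp0 : List Int := 1 :: List.replicate (j + 1).toNat 0
    -- for c in s[:i+1]: dp = [1] + [dp[m+1] + (dp[m] if sub[m] == c else 0) for m in range(j+1)]
    let dp := (PySem.Str.slice s none (some (i + 1))).toList.foldl
      (fun dp c =>
        1 :: (PySem.List.pyRange 0 (j + 1) 1).map (fun m =>
          PySem.List.pyGetD dp (m + 1) 0 +
            (if (PySem.Str.pyGet? sub m).getD ' ' == c then PySem.List.pyGetD dp m 0 else 0)))
      dp0
    PySem.List.pyGetD dp (j + 1) 0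

-- ===== PRECONDITION & SPEC =====
-- Pre_ excludes exactly the inputs where A raises IndexError on s[i] or sub[j]:
-- those with 0 ≤ i and 0 ≤ j where i or j is past the end of its string.
def Pre_distinctSub (s : String) (sub : String) (i : Int) (j : Int) : Prop :=
  0 ≤ j → 0 ≤ i → (j < (sub.toList.length : Int) ∧ i < (s.toList.length : Int))
instance (s : String) (sub : String) (i : Int) (j : Int) : Decidable (Pre_distinctSub s sub i j) := by
  unfold Pre_distinctSub; infer_instance

def pvWitness_distinctSub : String × String × Int × Int := ("babgbag", "bag", 6, 2)

def Spec_distinctSub (s : String) (sub : String) (i : Int) (j : Int) (out : Int) : Prop := out = distinctSub_alt s sub i j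
instance (s : String) (sub : String) (i : Int) (j : Int) (out : Int) : Decidable (Spec_distinctSub s sub i j out) := by unfold Spec_distinctSub; infer_instance

-- ===== CLAIM (what is proved, stated in full; the proofs are below) =====
def Claim_equal_distinctSub : Prop := ∀ (s : String) (sub : String) (i : Int) (j : Int), Dom_distinctSub s sub i j → Pre_distinctSub s sub i j → Spec_distinctSub s sub i j (distinctSub s sub i j)


-- ===== LEMMAS AND PROOFS =====

-- reference count: number of subsequences of t (read head-first) equal to u
def pvCnt : List Char → List Char → Int
  | _, [] => 1
  | [], _ :: _ => 0
  | a :: t, b :: u => if a == b then pvCnt t u + pvCnt t (b :: u) else pvCnt t (b :: u)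

lemma pvCnt_nil (u : List Char) (h : u ≠ []) : pvCnt [] u = 0 := by
  cases u with
  | nil => exact absurd rfl h
  | cons b u => rfl

lemma take_succ_reverse (l : List Char) (n : Nat) (h : n < l.length) :
    (l.take (n + 1)).reverse = l[n] :: (l.take n).reverse := by
  rw [List.take_add_one]
  simp [List.getElem?_eq_getElem h]


lemma pvCnt_nil_right (t : List Char) : pvCnt t [] = 1 := by
  cases t <;> rfl

-- A's recursion computes pvCnt on the reversed prefixes
lemma distinctSub_eq_pvCnt (s sub : String) :
    ∀ (n : Nat) (i j : Int), (i + 1).toNat ≤ n →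
      i < (s.toList.length : Int) → j < (sub.toList.length : Int) →
      distinctSub s sub i j
        = pvCnt ((s.toList.take (i + 1).toNat).reverse) ((sub.toList.take (j + 1).toNat).reverse) := by
  intro n
  induction n with
  | zero =>
    intro i j hn hi hj
    have hi0 : i < 0 := by omega
    rw [distinctSub]
    by_cases hj0 : j < 0
    · have h1 : (j + 1).toNat = 0 := by omega
      simp [hj0, h1, pvCnt_nil_right]
    · have h1 : (i + 1).toNat = 0 := by omega
      have hne : ((sub.toList.take (j + 1).toNat).reverse) ≠ [] := by
        apply List.ne_nil_of_length_pos
        rw [List.length_reverse, List.length_take]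
        omega
      simp only [dif_neg hj0, dif_pos hi0, h1, List.take_zero, List.reverse_nil]
      rw [pvCnt_nil _ hne]
  | succ n ih =>
    intro i j hn hi hj
    rw [distinctSub]
    by_cases hj0 : j < 0
    · have h1 : (j + 1).toNat = 0 := by omega
      simp [hj0, h1, pvCnt_nil_right]
    · by_cases hi0 : i < 0
      · have h1 : (i + 1).toNat = 0 := by omega
        have hne : ((sub.toList.take (j + 1).toNat).reverse) ≠ [] := by
          apply List.ne_nil_of_length_pos
          rw [List.length_reverse, List.length_take]
          omega
        simp only [dif_neg hj0, dif_pos hi0, h1, List.take_zero, List.reverse_nil]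
        rw [pvCnt_nil _ hne]
      · have hsi : PySem.Str.pyGet? s i = some (s.toList[i.toNat]) := by
          simp [PySem.List.pyGet?_of_nonneg s.toList (by omega : (0:Int) ≤ i),
            List.getElem?_eq_getElem (by omega : i.toNat < s.toList.length)]
        have hsj : PySem.Str.pyGet? sub j = some (sub.toList[j.toNat]) := by
          simp [PySem.List.pyGet?_of_nonneg sub.toList (by omega : (0:Int) ≤ j),
            List.getElem?_eq_getElem (by omega : j.toNat < sub.toList.length)]
        simp only [dif_neg hj0, dif_neg hi0, hsi, hsj]
        have hti : (i + 1).toNat = i.toNat + 1 := by omega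
        have htj : (j + 1).toNat = j.toNat + 1 := by omega
        rw [hti, htj, take_succ_reverse _ _ (by omega), take_succ_reverse _ _ (by omega)]
        have e1 : distinctSub s sub (i - 1) (j - 1)
            = pvCnt ((s.toList.take (i - 1 + 1).toNat).reverse) ((sub.toList.take (j - 1 + 1).toNat).reverse) :=
          ih (i - 1) (j - 1) (by omega) (by omega) (by omega)
        have e2 : distinctSub s sub (i - 1) j
            = pvCnt ((s.toList.take (i - 1 + 1).toNat).reverse) ((sub.toList.take (j + 1).toNat).reverse) :=
          ih (i - 1) j (by omega) (by omega) hj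
        have hri : (i - 1 + 1).toNat = i.toNat := by omega
        have hrj : (j - 1 + 1).toNat = j.toNat := by omega
        rw [hri] at e1 e2
        rw [hrj] at e1
        rw [htj, take_succ_reverse _ _ (by omega)] at e2
        rw [pvCnt, e1, e2]



-- B's DP row: entry m+1 counts subsequences of the processed prefix equal to sub[:m+1]
def pvRow (sub : List Char) (jn : Nat) (cs : List Char) : List Int :=
  1 :: (List.range jn).map (fun m => pvCnt cs.reverse ((sub.take (m + 1)).reverse))

lemma pvRow_getD (sub : List Char) (jn : Nat) (cs : List Char) (m : Nat) (hm : m ≤ jn) :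
    (pvRow sub jn cs).getD m 0 = pvCnt cs.reverse ((sub.take m).reverse) := by
  cases m with
  | zero => simp [pvRow, pvCnt_nil_right]
  | succ m =>
    have hm' : m < jn := by omega
    simp [pvRow, List.getD, hm']

lemma pvRow_nil (sub : List Char) (jn : Nat) (h : jn ≤ sub.length) :
    pvRow sub jn [] = 1 :: List.replicate jn 0 := by
  unfold pvRow
  congr 1
  rw [List.eq_replicate_iff]
  refine ⟨by simp, ?_⟩
  intro b hb
  simp only [List.mem_map, List.mem_range] at hb
  obtain ⟨m, hm, rfl⟩ := hb
  rw [List.reverse_nil, pvCnt_nil]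
  apply List.ne_nil_of_length_pos
  rw [List.length_reverse, List.length_take]
  omega

lemma pvRow_step (sub : String) (j : Int) (hj0 : 0 ≤ j) (hj : j < (sub.toList.length : Int))
    (cs : List Char) (c : Char) :
    (1 :: (PySem.List.pyRange 0 (j + 1) 1).map (fun m =>
        PySem.List.pyGetD (pvRow sub.toList (j + 1).toNat cs) (m + 1) 0 +
          (if (PySem.Str.pyGet? sub m).getD ' ' == c
            then PySem.List.pyGetD (pvRow sub.toList (j + 1).toNat cs) m 0 else 0)))
      = pvRow sub.toList (j + 1).toNat (cs ++ [c]) := by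
  conv_rhs => rw [pvRow]
  congr 1
  rw [PySem.List.pyRange_one 0 (j + 1), List.map_map]
  rw [show j + 1 - 0 = j + 1 by ring]
  apply List.map_congr_left
  intro m hm
  simp only [List.mem_range] at hm
  have hmj : m < (j + 1).toNat := hm
  have hms : m < sub.toList.length := by omega
  have c1 : ((m : Int) + 1) = (((m + 1 : Nat)) : Int) := by omega
  have c2 : ((0 : Int) + (m : Int)) = ((m : Nat) : Int) := by push_cast; ring
  simp only [Function.comp_apply, c2, c1, PySem.List.pyGetD_natCast]
  rw [pvRow_getD _ _ _ _ (by omega), pvRow_getD _ _ _ _ (by omega)]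
  have hget : (PySem.Str.pyGet? sub ((m : Nat) : Int)).getD ' ' = sub.toList[m] := by
    simp [List.getElem?_eq_getElem hms]
  rw [hget, List.reverse_append, take_succ_reverse _ _ hms]
  show _ = pvCnt (c :: cs.reverse) (sub.toList[m] :: (sub.toList.take m).reverse)
  rw [pvCnt]
  by_cases hb : sub.toList[m] = c
  · simp [hb]
    omega
  · have hb1 : (sub.toList[m] == c) = false := by simp [hb]
    have hb2 : (c == sub.toList[m]) = false := by simp [Ne.symm hb]
    rw [hb1, hb2]
    simp

lemma foldl_pvRow (sub : String) (j : Int) (hj0 : 0 ≤ j) (hj : j < (sub.toList.length : Int))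
    (cs : List Char) :
    cs.foldl
      (fun dp c =>
        1 :: (PySem.List.pyRange 0 (j + 1) 1).map (fun m =>
          PySem.List.pyGetD dp (m + 1) 0 +
            (if (PySem.Str.pyGet? sub m).getD ' ' == c then PySem.List.pyGetD dp m 0 else 0)))
      (pvRow sub.toList (j + 1).toNat [])
      = pvRow sub.toList (j + 1).toNat cs := by
  induction cs using List.reverseRecOn with
  | nil => rfl
  | append_singleton cs c ih =>
    rw [List.foldl_append, List.foldl_cons, List.foldl_nil, ih, pvRow_step sub j hj0 hj]

lemma distinctSub_alt_eq_pvCnt (s sub : String) (i j : Int) (hi0 : ¬ i < 0) (hj0 : ¬ j < 0)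
    (hj : j < (sub.toList.length : Int)) :
    distinctSub_alt s sub i j
      = pvCnt ((s.toList.take (i + 1).toNat).reverse) ((sub.toList.take (j + 1).toNat).reverse) := by
  unfold distinctSub_alt
  simp only [if_neg hj0, if_neg hi0]
  have hsl : (PySem.Str.slice s none (some (i + 1))).toList = s.toList.take (i + 1).toNat := by
    simp [PySem.List.slice_to _ (by omega : (0:Int) ≤ i + 1)]
  rw [hsl, ← pvRow_nil sub.toList (j + 1).toNat (by omega),
    foldl_pvRow sub j (by omega) hj]
  generalize hjn : (j + 1).toNat = jn
  rw [show (j + 1 : Int) = ((jn : Nat) : Int) by omega, PySem.List.pyGetD_natCast,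
    pvRow_getD _ _ _ _ le_rfl]


-- ===== VERDICT (by name: the statement is the Claim_ definition above) =====
theorem distinctSub_spec : Claim_equal_distinctSub := by
  intro s sub i j _ hpre
  unfold Spec_distinctSub
  by_cases hj0 : j < 0
  · rw [distinctSub]
    unfold distinctSub_alt
    simp [hj0]
  · by_cases hi0 : i < 0
    · rw [distinctSub]
      unfold distinctSub_alt
      simp [hj0, hi0]
    · obtain ⟨hj, hi⟩ := hpre (by omega) (by omega)
      rw [distinctSub_eq_pvCnt s sub (i + 1).toNat i j le_rfl hi hj,
        distinctSub_alt_eq_pvCnt s sub i j hi0 hj0 hj]
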